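-- pv_equiv track=rewrite | github.com/kedro-org/kedro-viz | package/kedro_viz/models.py | _expand_namespaces
-- ===== SOURCE A (Python) =====
-- def _expand_namespaces(namespace):
--     """
--     Expand a node's namespace to the modular pipelines this node belongs to.
--     For example, if the node's namespace is: "pipeline1.data_science"
--     it should be expanded to: ["pipeline1", "pipeline1.data_science"]
--     """
--     if not namespace:
--         return []
--     namespace_list = []
--     namespace_chunks = namespace.split(".")
--     prefix = ""
--     for chunk in namespace_chunks:
--         if prefix:
--             prefix = f"{prefix}.{chunk}"
--         else:
--             prefix = chunk
--         namespace_list.append(prefix)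
--     return namespace_list
-- ===== SOURCE B (Python) =====
-- def _expand_namespaces(namespace):
--     if not namespace:
--         return []
--     parts = namespace.split(".")
--     return [".".join(parts[:i + 1]) for i in range(len(parts))]
-- ===== Notes on version B (the rewrite author's own statement) =====
-- stated objective: simpler
-- what changed: Replaced the accumulator-threaded loop (running prefix extended chunk by chunk, appended to a list) by a single split followed by independent reconstruction of each cumulative prefix as '.'.join(parts[:i+1]) over range(len(parts)).
-- intended difference: On namespaces beginning with '.', A's truthiness test on the empty running prefix silently swallows the leading dot(s) (A('.a') = ['', 'a']), while B returns the literal cumulative dotted prefixes (B('.a') = ['', '.a']), which is the intended expansion since each element should be an actual prefix of the namespace. — e.g. on _expand_namespaces(some ".a"): A returns ["", "a"], B returns ["", ".a"]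
import Mathlib
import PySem

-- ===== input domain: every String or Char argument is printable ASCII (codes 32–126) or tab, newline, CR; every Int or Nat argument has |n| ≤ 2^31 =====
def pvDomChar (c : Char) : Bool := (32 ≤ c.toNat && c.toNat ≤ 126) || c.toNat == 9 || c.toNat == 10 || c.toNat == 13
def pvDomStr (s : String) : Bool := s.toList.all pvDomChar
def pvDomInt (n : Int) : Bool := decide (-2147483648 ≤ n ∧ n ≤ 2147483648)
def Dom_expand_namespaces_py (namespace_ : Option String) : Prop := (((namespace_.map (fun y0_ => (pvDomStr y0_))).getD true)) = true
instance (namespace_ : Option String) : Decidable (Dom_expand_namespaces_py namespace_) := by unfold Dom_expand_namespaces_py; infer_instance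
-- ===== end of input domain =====

-- B replaces A's running-prefix accumulator loop by one split plus an independent
-- slice-and-join reconstruction of each cumulative prefix (objective: simpler);
-- on namespaces starting with '.' B returns the literal prefixes where A drops the leading dots (see D_).


-- ===== PORT A =====
-- loop body of A: extend the running prefix ('if prefix:' is string truthiness,
-- f"{prefix}.{chunk}" is concatenation — exact as List Char append) and append it to the list
def expandStep (st : List (List Char) × List Char) (chunk : List Char) : List (List Char) × List Char :=
  let pfx := if st.2 ≠ [] then st.2 ++ '.' :: chunk else chunk
  (st.1 ++ [pfx], pfx)

def expand_namespaces_py (namespace_ : Option String) : List String :=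
  match namespace_ with
  | none => []      -- 'if not namespace' on None
  | some s =>
    if s = "" then []      -- 'if not namespace' on the empty string
    else
      let chunks := PySem.Chars.splitOn s.toList ['.']      -- namespace.split(".") (exact: sep ≠ "")
      ((chunks.foldl expandStep ([], [])).1).map String.ofList

-- ===== PORT B =====
def expand_namespaces_py_alt (namespace_ : Option String) : List String :=
  match namespace_ with
  | none => []
  | some s =>
    if s = "" then []
    else
      let parts := PySem.Chars.splitOn s.toList ['.']      -- namespace.split(".") (exact: sep ≠ "")
      -- [".".join(parts[:i+1]) for i in range(len(parts))]
      (List.range parts.length).map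
        (fun i => String.ofList (PySem.Chars.join ['.'] (parts.take (i + 1))))

-- ===== PRECONDITION & SPEC =====
-- On namespaces beginning with '.', A's truthiness test on the empty running prefix
-- silently swallows the leading dot(s) (A('.a') = ['', 'a']), while B returns the
-- literal cumulative dotted prefixes (B('.a') = ['', '.a']), which is the intended
-- expansion since each element should be an actual prefix of the namespace.
def D_expand_namespaces_py (namespace_ : Option String) : Prop :=
  ((namespace_.getD "").toList.head? = some '.')
instance (namespace_ : Option String) : Decidable (D_expand_namespaces_py namespace_) := by
  unfold D_expand_namespaces_py; infer_instance

def Spec_expand_namespaces_py (namespace_ : Option String) (out : List String) : Prop :=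
  ¬ D_expand_namespaces_py namespace_ → out = expand_namespaces_py_alt namespace_
instance (namespace_ : Option String) (out : List String) : Decidable (Spec_expand_namespaces_py namespace_ out) := by
  unfold Spec_expand_namespaces_py; infer_instance

def pvDiffWitness_expand_namespaces_py : Option String := some ".a"
def pvDiffWitnessOut_expand_namespaces_py : (List String) × (List String) := (["", "a"], ["", ".a"])

-- ===== CLAIM (what is proved, stated in full; the proofs are below) =====
def Claim_unchanged_expand_namespaces_py : Prop := ∀ (namespace_ : Option String), Dom_expand_namespaces_py namespace_ → Spec_expand_namespaces_py namespace_ (expand_namespaces_py namespace_)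
def Claim_changed_expand_namespaces_py : Prop := Dom_expand_namespaces_py (pvDiffWitness_expand_namespaces_py) ∧ D_expand_namespaces_py (pvDiffWitness_expand_namespaces_py) ∧ expand_namespaces_py (pvDiffWitness_expand_namespaces_py) = pvDiffWitnessOut_expand_namespaces_py.1 ∧ expand_namespaces_py_alt (pvDiffWitness_expand_namespaces_py) = pvDiffWitnessOut_expand_namespaces_py.2 ∧ pvDiffWitnessOut_expand_namespaces_py.1 ≠ pvDiffWitnessOut_expand_namespaces_py.2
def Claim_exact_expand_namespaces_py : Prop := ∀ (namespace_ : Option String), Dom_expand_namespaces_py namespace_ → D_expand_namespaces_py namespace_ → expand_namespaces_py namespace_ ≠ expand_namespaces_py_alt namespace_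

-- ===== LEMMAS AND PROOFS =====

-- splitOn's worker always produces acc.reverse followed by a first chunk extending cur.
lemma go_shape (fuel : Nat) : ∀ (l cur : List Char) (acc : List (List Char)),
    ∃ ch r, PySem.Chars.splitOn.go ['.'] fuel l cur acc = acc.reverse ++ ch :: r ∧
      cur.reverse <+: ch := by
  induction fuel with
  | zero =>
    intro l cur acc
    exact ⟨cur.reverse ++ l, [], by simp [PySem.Chars.splitOn.go], List.prefix_append _ _⟩
  | succ n ih =>
    intro l cur acc
    cases l with
    | nil => exact ⟨cur.reverse, [], by simp [PySem.Chars.splitOn.go], List.prefix_refl _⟩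
    | cons c rest =>
      by_cases h : (List.isPrefixOf ['.'] (c :: rest)) = true
      · obtain ⟨ch, r, hgo, _⟩ := ih (List.drop 1 (c :: rest)) [] (cur.reverse :: acc)
        refine ⟨cur.reverse, ch :: r, ?_, List.prefix_refl _⟩
        rw [show PySem.Chars.splitOn.go ['.'] (n+1) (c :: rest) cur acc
            = PySem.Chars.splitOn.go ['.'] n (List.drop 1 (c :: rest)) [] (cur.reverse :: acc) from by
          simp [PySem.Chars.splitOn.go, h], hgo]
        simp
      · obtain ⟨ch, r, hgo, hpre⟩ := ih rest (c :: cur) acc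
        refine ⟨ch, r, ?_, ?_⟩
        · rw [show PySem.Chars.splitOn.go ['.'] (n+1) (c :: rest) cur acc
              = PySem.Chars.splitOn.go ['.'] n rest (c :: cur) acc from by
            simp [PySem.Chars.splitOn.go, h], hgo]
        · exact List.IsPrefix.trans (List.prefix_append _ [c]) (by simpa using hpre)

-- joining one more chunk onto a cumulative prefix
lemma joinDots_cons (p c : List Char) (l : List (List Char)) :
    PySem.Chars.join ['.'] ((p ++ '.' :: c) :: l) = p ++ '.' :: PySem.Chars.join ['.'] (c :: l) := by
  cases l with
  | nil => simp [PySem.Chars.join_singleton]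
  | cons q r => rw [PySem.Chars.join_cons_cons, PySem.Chars.join_cons_cons]; simp

-- A's fold, once the prefix is nonempty, produces exactly B's slice-joins.
lemma fold_char (cs : List (List Char)) : ∀ (p : List Char) (acc : List (List Char)), p ≠ [] →
    (cs.foldl expandStep (acc, p)).1 =
      acc ++ (List.range cs.length).map (fun i => PySem.Chars.join ['.'] (p :: cs.take (i + 1))) := by
  induction cs with
  | nil => intro p acc _; simp
  | cons c cs ih =>
    intro p acc hp
    have hstep : expandStep (acc, p) c = (acc ++ [p ++ '.' :: c], p ++ '.' :: c) := by
      simp [expandStep, hp]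
    rw [List.foldl_cons, hstep, ih (p ++ '.' :: c) _ (by simp)]
    rw [List.length_cons, List.range_succ_eq_map]
    simp only [List.map_cons, List.map_map, List.take_succ_cons, List.append_assoc,
      List.singleton_append]
    have h1 : PySem.Chars.join ['.'] [p, c] = p ++ '.' :: c := by
      rw [PySem.Chars.join_cons_cons, PySem.Chars.join_singleton]; simp
    have h2 : (List.map (fun i => PySem.Chars.join ['.'] ((p ++ '.' :: c) :: List.take (i + 1) cs)) (List.range cs.length))
        = List.map (fun i => PySem.Chars.join ['.'] (p :: c :: List.take (i + 1) cs)) (List.range cs.length) := by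
      refine List.map_congr_left ?_
      intro a _
      rw [joinDots_cons, PySem.Chars.join_cons_cons]
      simp
    simp only [List.take_zero, Function.comp_def, Nat.succ_eq_add_one]
    rw [h1, h2]

-- the fold only ever appends to the accumulated list
lemma fold_append (cs : List (List Char)) : ∀ st : List (List Char) × List Char,
    ∃ t, (cs.foldl expandStep st).1 = st.1 ++ t := by
  induction cs with
  | nil => intro st; exact ⟨[], by simp⟩
  | cons c cs ih =>
    intro st
    obtain ⟨t, ht⟩ := ih (expandStep st c)
    refine ⟨(expandStep st c).2 :: t, ?_⟩
    rw [List.foldl_cons, ht]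
    simp [expandStep]

-- ===== VERDICT (by name: the statement is the Claim_ definition above) =====
theorem expand_namespaces_py_spec : Claim_unchanged_expand_namespaces_py := by
  intro n _ hD
  match n with
  | none => rfl
  | some s =>
    by_cases hs : s = ""
    · simp [expand_namespaces_py, expand_namespaces_py_alt, hs]
    · have hl : s.toList ≠ [] := by
        intro h
        apply hs
        have := congrArg String.ofList h
        simpa using this
      obtain ⟨c, rest, hcr⟩ := List.exists_cons_of_ne_nil hl
      have hc : ('.' == c) = false := by
        apply beq_eq_false_iff_ne.mpr
        intro h
        exact hD (by simp [D_expand_namespaces_py, hcr, ← h])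
      have hpref : List.isPrefixOf ['.'] (c :: rest) = false := by
        simp [List.isPrefixOf, hc]
      have hsplit : PySem.Chars.splitOn s.toList ['.'] =
          PySem.Chars.splitOn.go ['.'] (rest.length + 1) rest [c] [] := by
        rw [PySem.Chars.splitOn, hcr]
        show PySem.Chars.splitOn.go ['.'] ((rest.length + 1) + 1) (c :: rest) [] [] = _
        simp [PySem.Chars.splitOn.go, hpref]
      obtain ⟨ch, r, hgo, hp⟩ := go_shape (rest.length + 1) rest [c] []
      have hch : ch ≠ [] := by
        intro h; rw [h] at hp; simp at hp
      have hchunks : PySem.Chars.splitOn s.toList ['.'] = ch :: r := by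
        rw [hsplit, hgo]; simp
      have hstep0 : expandStep ([], []) ch = ([ch], ch) := by simp [expandStep]
      simp only [expand_namespaces_py, expand_namespaces_py_alt, if_neg hs, hchunks,
        List.foldl_cons, hstep0, fold_char r ch [ch] hch, List.length_cons,
        List.range_succ_eq_map, List.map_cons, List.map_map, List.take_succ_cons,
        Function.comp_def, Nat.succ_eq_add_one, List.take_zero,
        PySem.Chars.join_singleton, List.singleton_append]

theorem expand_namespaces_py_changed : Claim_changed_expand_namespaces_py := by
  unfold Claim_changed_expand_namespaces_py; decide

theorem expand_namespaces_py_tight : Claim_exact_expand_namespaces_py := by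
  intro n _ hD
  match n with
  | none => simp [D_expand_namespaces_py] at hD
  | some s =>
    have hcr : ∃ rest, s.toList = '.' :: rest := by
      unfold D_expand_namespaces_py at hD
      simp at hD
      cases h : s.toList with
      | nil => rw [h] at hD; simp at hD
      | cons a b => rw [h] at hD; simp at hD; exact ⟨b, by rw [hD]⟩
    obtain ⟨rest, hcr⟩ := hcr
    have hs : s ≠ "" := by
      intro h; rw [h] at hcr; simp at hcr
    have hsplit : PySem.Chars.splitOn s.toList ['.'] =
        PySem.Chars.splitOn.go ['.'] (rest.length + 1) rest [] [[]] := by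
      rw [PySem.Chars.splitOn, hcr]
      show PySem.Chars.splitOn.go ['.'] ((rest.length + 1) + 1) ('.' :: rest) [] [] = _
      simp [PySem.Chars.splitOn.go, List.isPrefixOf]
    obtain ⟨ch, r, hgo, -⟩ := go_shape (rest.length + 1) rest [] [[]]
    have hchunks : PySem.Chars.splitOn s.toList ['.'] = [] :: ch :: r := by
      rw [hsplit, hgo]; simp
    obtain ⟨t, ht⟩ := fold_append r (expandStep (expandStep ([], []) []) ch)
    have hAB : expand_namespaces_py (some s) = String.ofList [] :: String.ofList ch :: t.map String.ofList ∧
        ∃ tb, expand_namespaces_py_alt (some s) =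
          String.ofList [] :: String.ofList ('.' :: ch) :: tb := by
      constructor
      · simp only [expand_namespaces_py, if_neg hs, hchunks, List.foldl_cons]
        rw [show expandStep (expandStep ([], []) []) ch = ([[], ch], ch) from by simp [expandStep]] at ht ⊢
        rw [ht]; simp
      · refine ⟨(List.range r.length).map
            (fun x => String.ofList (PySem.Chars.join ['.'] ([] :: ch :: List.take (x + 1) r))), ?_⟩
        simp only [expand_namespaces_py_alt, if_neg hs, hchunks, List.length_cons,
          List.range_succ_eq_map, List.map_cons, List.map_map, Function.comp_def,
          Nat.succ_eq_add_one, List.take_succ_cons, List.take_zero,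
          PySem.Chars.join_singleton]
        rw [show PySem.Chars.join ['.'] [[], ch] = '.' :: ch from by
          rw [PySem.Chars.join_cons_cons, PySem.Chars.join_singleton]; simp]
    obtain ⟨hA, tb, hB⟩ := hAB
    intro heq
    rw [hA, hB] at heq
    have := congrArg (fun l => l[1]?) heq
    simp at this
    have := congrArg String.toList this
    simp at this
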